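-- pv_equiv track=rewrite | github.com/tianyuwang97/popularExchanges_Stage | housemarkets/utility.py | to_order
-- ===== SOURCE A (Python) =====
-- import copy
--
-- def to_order(utilities):
-- 	res = []
-- 	for u in utilities:
-- 		u = list(u)
-- 		tmp = []
-- 		v = copy.deepcopy(u)
-- 		v.sort()
-- 		for i in v:
-- 			tmp.append(u.index(i))
-- 		res.append(tmp)
-- 	return res
-- ===== SOURCE B (Python) =====
-- def to_order(utilities):
--     res = []
--     for u in utilities:
--         pairs = sorted(enumerate(u), key=lambda p: p[1])
--         out = []
--         prev = None  # (value, index emitted for it)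
--         for i, x in pairs:
--             if prev is not None and prev[0] == x:
--                 j = prev[1]
--             else:
--                 j = i
--             out.append(j)
--             prev = (x, j)
--         res.append(out)
--     return res
-- ===== Notes on version B (the rewrite author's own statement) =====
-- stated objective: faster
-- what changed: Instead of scanning u.index(i) for every sorted element, B stably sorts the (index,value) pairs from enumerate(u) and collapses runs of equal values in one pass, reusing the run leader's index (the first occurrence, by sort stability).
import Mathlib
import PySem

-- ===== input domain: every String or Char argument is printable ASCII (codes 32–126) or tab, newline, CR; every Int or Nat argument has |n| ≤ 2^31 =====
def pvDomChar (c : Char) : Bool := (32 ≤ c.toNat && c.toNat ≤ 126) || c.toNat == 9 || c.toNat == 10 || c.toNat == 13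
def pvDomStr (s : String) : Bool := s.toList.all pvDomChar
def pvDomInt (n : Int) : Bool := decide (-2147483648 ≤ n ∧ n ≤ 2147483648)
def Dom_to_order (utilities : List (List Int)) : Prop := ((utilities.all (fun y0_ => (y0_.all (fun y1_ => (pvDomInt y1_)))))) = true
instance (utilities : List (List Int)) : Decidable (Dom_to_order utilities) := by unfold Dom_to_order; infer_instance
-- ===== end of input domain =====

-- B replaces A's repeated u.index() inner scan with a stable sort of (index,value) pairs followed by a one-pass run collapse (faster: asymptotic).


-- ===== PORT A =====
-- for u in utilities: v = sorted(u); tmp = [u.index(i) appended one by one]; res.append(tmp)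
-- u.index(i) never raises here (i comes from a permutation of u), so .getD 0 is unreachable padding.
def to_order (utilities : List (List Int)) : List (List Int) :=
  utilities.foldl (fun res u =>
    let tmp := (PySem.List.sorted u (fun x => x) false).foldl
      (fun tmp i => tmp ++ [(((PySem.List.index? u i).getD 0 : Nat) : Int)]) []
    res ++ [tmp]) []

-- ===== PORT B =====
-- loop body: if prev is not None and prev[0] == x: j = prev[1] else: j = i; out.append(j); prev = (x, j)
def rowStep (st : List Int × Option (Int × Int)) (p : Int × Int) : List Int × Option (Int × Int) :=
  let j := match st.2 with
    | some pr => if pr.1 == p.2 then pr.2 else p.1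
    | none => p.1
  (st.1 ++ [j], some (p.2, j))

-- pairs = sorted(enumerate(u), key=lambda p: p[1]); then the run-collapse loop above
def rowAlt (u : List Int) : List Int :=
  ((PySem.List.sorted (PySem.List.enumerate u 0) (fun p => p.2) false).foldl rowStep ([], none)).1

def to_order_alt (utilities : List (List Int)) : List (List Int) :=
  utilities.map rowAlt

-- ===== PRECONDITION & SPEC =====
def Spec_to_order (utilities : List (List Int)) (out : List (List Int)) : Prop := out = to_order_alt utilities
instance (utilities : List (List Int)) (out : List (List Int)) : Decidable (Spec_to_order utilities out) := by unfold Spec_to_order; infer_instance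

-- ===== CLAIM (what is proved, stated in full; the proofs are below) =====
def Claim_equal_to_order : Prop := ∀ (utilities : List (List Int)), Dom_to_order utilities → Spec_to_order utilities (to_order utilities)

-- ===== LEMMAS AND PROOFS =====

-- strict lexicographic order on (index, value) pairs, by value first: the order the stable sort realises
def lexOK (a b : Int × Int) : Prop := a.2 < b.2 ∨ (a.2 = b.2 ∧ a.1 < b.1)

-- the Int value A's inner loop appends for value x
def idxI (u : List Int) (x : Int) : Int := (((PySem.List.index? u x).getD 0 : Nat) : Int)

-- inserting a pair whose index is larger than all accumulated indices keeps the accumulator lex-sorted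
lemma insertBy_pairwise_lexOK (x : Int × Int) (acc : List (Int × Int))
    (hp : acc.Pairwise lexOK) (hf : ∀ a ∈ acc, a.1 < x.1) :
    (PySem.List.insertBy (fun a b => decide (a.2 < b.2)) x acc).Pairwise lexOK := by
  induction acc with
  | nil => simp [PySem.List.insertBy, lexOK]
  | cons y t ih =>
    simp only [PySem.List.insertBy]
    rcases List.pairwise_cons.mp hp with ⟨hyt, hpt⟩
    by_cases hlt : x.2 < y.2
    · simp only [decide_eq_true_eq, if_pos hlt]
      refine List.pairwise_cons.mpr ⟨?_, hp⟩
      intro z hz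
      rcases List.mem_cons.mp hz with hz | hz
      · exact Or.inl (by simpa [hz] using hlt)
      · rcases hyt z hz with h | ⟨he, _⟩
        · exact Or.inl (lt_trans hlt h)
        · exact Or.inl (he ▸ hlt)
    · simp only [decide_eq_true_eq, if_neg hlt]
      refine List.pairwise_cons.mpr ⟨?_, ih hpt (fun a ha => hf a (List.mem_cons_of_mem _ ha))⟩
      intro z hz
      rcases (PySem.List.mem_insertBy _ x z t).mp hz with hz | hz
      · subst hz
        rcases lt_or_eq_of_le (not_lt.mp hlt) with h | h
        · exact Or.inl h
        · exact Or.inr ⟨h, hf y (List.mem_cons_self)⟩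
      · exact hyt z hz

-- folding the insertion sort over enumerate(v, s) keeps the accumulator lex-sorted
lemma foldl_insertBy_enumerate_pairwise (v : List Int) :
    ∀ (s : Int) (acc : List (Int × Int)), acc.Pairwise lexOK → (∀ a ∈ acc, a.1 < s) →
    ((PySem.List.enumerate v s).foldl
      (fun acc x => PySem.List.insertBy (fun a b => decide ((a.2 : Int) < b.2)) x acc) acc).Pairwise lexOK := by
  induction v with
  | nil => intro s acc hp _; simpa [PySem.List.enumerate_nil] using hp
  | cons x v ih =>
    intro s acc hp hf
    rw [PySem.List.enumerate_cons]
    simp only [List.foldl_cons]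
    refine ih (s + 1) _ (insertBy_pairwise_lexOK (s, x) acc hp (by simpa using hf)) ?_
    intro a ha
    rcases (PySem.List.mem_insertBy _ _ a acc).mp ha with h | h
    · subst h; simp
    · exact lt_trans (hf a h) (by omega)

-- the stable sort of enumerate(u) is pairwise lex-increasing
lemma sorted_enumerate_pairwise (u : List Int) :
    (PySem.List.sorted (PySem.List.enumerate u 0) (fun p => p.2) false).Pairwise lexOK := by
  rw [PySem.List.sorted_eq_foldl_insertBy]
  exact foldl_insertBy_enumerate_pairwise u 0 [] (by simp) (by simp)

-- a pair of enumerate(u) with minimal index among its value's occurrences names the first occurrence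
lemma idxI_of_min (u : List Int) (b : Int × Int)
    (hb : b ∈ PySem.List.enumerate u 0)
    (hmin : ∀ q ∈ PySem.List.enumerate u 0, q.2 = b.2 → b.1 ≤ q.1) :
    idxI u b.2 = b.1 := by
  rcases (PySem.List.mem_enumerate_iff u 0 b).mp hb with ⟨k, hk, hbk⟩
  have hb1 : b.1 = (k : Int) := by simp [hbk]
  have hb2 : b.2 = u[k] := by simp [hbk]
  have hmem : b.2 ∈ u := by rw [hb2]; exact List.getElem_mem hk
  rcases Option.isSome_iff_exists.mp ((PySem.List.index?_isSome_iff u b.2).mpr hmem) with ⟨k0, hk0⟩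
  rcases PySem.List.getElem_of_index?_eq_some hk0 with ⟨hk0lt, hval, hfirst⟩
  have h1 : b.1 ≤ (k0 : Int) := by
    have hq : ((k0 : Int), u[k0]) ∈ PySem.List.enumerate u 0 :=
      (PySem.List.mem_enumerate_iff u 0 _).mpr ⟨k0, hk0lt, by simp⟩
    simpa using hmin _ hq (by simpa using hval)
  have h2 : (k0 : Int) ≤ (k : Int) := by
    by_contra h
    exact hfirst k (by omega) hb2.symm
  have hkk : k0 = k := by omega
  unfold idxI
  rw [hk0]
  simp [hkk, hb1]

-- the run-collapse fold emits the first-occurrence index for every pair of a lex-sorted sublist of enumerate(u)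
lemma fold_run (u : List Int) :
    ∀ (S : List (Int × Int)) (out : List Int) (prev : Option (Int × Int)),
    S.Pairwise lexOK →
    (∀ p ∈ S, p ∈ PySem.List.enumerate u 0) →
    (match prev with
     | none => ∀ p ∈ S, ∀ q ∈ PySem.List.enumerate u 0, q.2 = p.2 → q ∈ S
     | some pr => pr.2 = idxI u pr.1 ∧ (∀ p ∈ S, pr.1 ≤ p.2) ∧
         (∀ p ∈ S, p.2 ≠ pr.1 → ∀ q ∈ PySem.List.enumerate u 0, q.2 = p.2 → q ∈ S)) →
    (S.foldl rowStep (out, prev)).1 = out ++ S.map (fun p => idxI u p.2) := by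
  intro S
  induction S with
  | nil => intro out prev _ _ _; simp
  | cons b rest ih =>
    intro out prev hpw hmem hinv
    rcases List.pairwise_cons.mp hpw with ⟨hbr, hpwr⟩
    have hmemr : ∀ p ∈ rest, p ∈ PySem.List.enumerate u 0 :=
      fun p hp => hmem p (List.mem_cons_of_mem _ hp)
    -- in the "leader" cases, b has the minimal index among its value's occurrences in S ∪ {b}
    have hlead : (∀ q ∈ PySem.List.enumerate u 0, q.2 = b.2 → q ∈ b :: rest) → idxI u b.2 = b.1 := by
      intro hcl
      refine idxI_of_min u b (hmem b List.mem_cons_self) ?_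
      intro q hq hq2
      rcases List.mem_cons.mp (hcl q hq hq2) with h | h
      · subst h; exact le_refl _
      · rcases hbr q h with hlt | ⟨_, hlt⟩
        · omega
        · omega
    cases prev with
    | none =>
      have hclosure : ∀ p ∈ b :: rest, ∀ q ∈ PySem.List.enumerate u 0, q.2 = p.2 →
          q ∈ b :: rest := hinv
      have hj : idxI u b.2 = b.1 := hlead (fun q hq hq2 => hclosure b List.mem_cons_self q hq hq2)
      simp only [List.foldl_cons, rowStep]
      rw [ih (out ++ [b.1]) (some (b.2, b.1)) hpwr hmemr ?_]
      · simp [hj]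
      · refine ⟨by rw [hj], fun p hp => ?_, fun p hp hne q hq hq2 => ?_⟩
        · rcases hbr p hp with h | ⟨h, _⟩ <;> omega
        · rcases List.mem_cons.mp (hclosure p (List.mem_cons_of_mem _ hp) q hq hq2) with h | h
          · exact absurd (h ▸ hq2).symm hne
          · exact h
    | some pr =>
      rcases hinv with ⟨hpr, hmono, hclosure⟩
      by_cases hbe : pr.1 = b.2
      · -- same value as the previous pair: reuse the emitted index
        simp only [List.foldl_cons, rowStep, beq_iff_eq, if_pos hbe]
        rw [ih (out ++ [pr.2]) (some (b.2, pr.2)) hpwr hmemr ?_]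
        · simp [hpr, hbe]
        · refine ⟨by rw [hpr, hbe], fun p hp => ?_, fun p hp hne q hq hq2 => ?_⟩
          · rcases hbr p hp with h | ⟨h, _⟩ <;> omega
          · have hq3 : p.2 ≠ pr.1 := by rw [hbe]; exact hne
            rcases List.mem_cons.mp (hclosure p (List.mem_cons_of_mem _ hp) hq3 q hq hq2) with h | h
            · exact absurd (h ▸ hq2).symm hne
            · exact h
      · -- new value: b starts a run, so its index is the first occurrence
        have hcl : ∀ q ∈ PySem.List.enumerate u 0, q.2 = b.2 → q ∈ b :: rest :=
          fun q hq hq2 => hclosure b List.mem_cons_self (fun h => hbe h.symm) q hq hq2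
        have hj : idxI u b.2 = b.1 := hlead hcl
        have hbne : (pr.1 == b.2) = false := by simp [hbe]
        simp only [List.foldl_cons, rowStep, hbne, Bool.false_eq_true, if_false]
        rw [ih (out ++ [b.1]) (some (b.2, b.1)) hpwr hmemr ?_]
        · simp [hj]
        · refine ⟨by rw [hj], fun p hp => ?_, fun p hp hne q hq hq2 => ?_⟩
          · rcases hbr p hp with h | ⟨h, _⟩ <;> omega
          · have hb2 : pr.1 < b.2 := lt_of_le_of_ne (hmono b List.mem_cons_self) hbe
            have hpb : b.2 ≤ p.2 := by rcases hbr p hp with h | ⟨h, _⟩ <;> omega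
            have hq3 : p.2 ≠ pr.1 := by omega
            rcases List.mem_cons.mp (hclosure p (List.mem_cons_of_mem _ hp) hq3 q hq hq2) with h | h
            · exact absurd (h ▸ hq2).symm hne
            · exact h

-- the sorted values of u are the second components of the lex-sorted enumerate(u)
lemma sorted_values_eq (u : List Int) :
    PySem.List.sorted u (fun x => x) false =
    (PySem.List.sorted (PySem.List.enumerate u 0) (fun p => p.2) false).map (fun p => p.2) := by
  refine PySem.List.sorted_id_eq_of_perm_of_pairwise u _ ?_ ?_
  · have h1 := (PySem.List.sorted_perm (PySem.List.enumerate u 0) (fun p => p.2) false).map (fun p => p.2)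
    rw [PySem.List.map_snd_enumerate] at h1
    exact h1
  · exact List.Pairwise.map _ (fun a b h => by rcases h with h | ⟨h, _⟩ <;> omega)
      (sorted_enumerate_pairwise u)

-- A's row equals B's row
lemma row_eq (u : List Int) :
    (PySem.List.sorted u (fun x => x) false).foldl
      (fun tmp i => tmp ++ [(((PySem.List.index? u i).getD 0 : Nat) : Int)]) [] = rowAlt u := by
  rw [PySem.List.foldl_append_singleton_eq_map, sorted_values_eq, List.map_map]
  unfold rowAlt
  have hS := sorted_enumerate_pairwise u
  have hmem : ∀ p ∈ PySem.List.sorted (PySem.List.enumerate u 0) (fun p => p.2) false,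
      p ∈ PySem.List.enumerate u 0 := fun p hp =>
    (PySem.List.sorted_perm (PySem.List.enumerate u 0) (fun p => p.2) false).mem_iff.mp hp
  have hcl : ∀ p ∈ PySem.List.sorted (PySem.List.enumerate u 0) (fun p => p.2) false,
      ∀ q ∈ PySem.List.enumerate u 0, q.2 = p.2 →
      q ∈ PySem.List.sorted (PySem.List.enumerate u 0) (fun p => p.2) false := fun p _ q hq _ =>
    (PySem.List.sorted_perm (PySem.List.enumerate u 0) (fun p => p.2) false).mem_iff.mpr hq
  rw [fold_run u _ [] none hS hmem hcl]
  simp [idxI, Function.comp]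

-- ===== VERDICT (by name: the statement is the Claim_ definition above) =====
theorem to_order_spec : Claim_equal_to_order := by
  intro utilities _
  unfold Spec_to_order to_order to_order_alt
  rw [PySem.List.foldl_append_singleton_eq_map]
  exact List.map_congr_left (fun u _ => row_eq u)
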